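-- pv_equiv track=rewrite | github.com/ZhengZhang008/hello_algorithms | chapter_computational_complexity/iteration.py | while_loop_ii
-- ===== SOURCE A (Python) =====
-- def while_loop_ii(n: int) -> int:
--     result = 0
--     i = 1
--     # result = 1 + 4 + 10
--     while i <= n:
--         result += i
--         i += 1
--         i *= 2
--     return result
-- ===== SOURCE B (Python) =====
-- def while_loop_ii(n: int) -> int:
--     # Closed form: the loop variable takes values 3*2^k - 2; m terms satisfy <= n.
--     if n < 1:
--         return 0
--     m = ((n + 2) // 3).bit_length()
--     return 3 * (2 ** m - 1) - 2 * m
-- ===== Notes on version B (the rewrite author's own statement) =====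
-- stated objective: faster
-- what changed: Replaced A's while-loop accumulation over the doubling-incrementing sequence by a constant-time closed form: bit_length of the floored quotient counts the terms, and the answer is a geometric-sum formula in that count (zero when the loop never runs).
import Mathlib
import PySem

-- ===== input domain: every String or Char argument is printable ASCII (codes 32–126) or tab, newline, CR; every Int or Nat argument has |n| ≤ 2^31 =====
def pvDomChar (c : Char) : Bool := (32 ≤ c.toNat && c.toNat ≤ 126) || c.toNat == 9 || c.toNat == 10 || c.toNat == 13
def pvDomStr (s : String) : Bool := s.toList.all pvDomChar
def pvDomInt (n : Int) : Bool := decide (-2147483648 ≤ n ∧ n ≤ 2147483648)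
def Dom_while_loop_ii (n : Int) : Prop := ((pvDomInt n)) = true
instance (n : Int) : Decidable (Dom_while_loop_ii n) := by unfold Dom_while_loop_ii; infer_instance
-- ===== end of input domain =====

-- B replaces A's while-loop accumulation by an O(1) closed form 3*(2^m-1)-2*m with m from a bit_length.

-- ===== PORT A =====
-- the while loop of A; i starts at 1 and stays ≥ 1, so it is carried as a Nat for termination
def whileA (n result : Int) (i : Nat) : Int :=
  if (i : Int) ≤ n then whileA n (result + i) ((i + 1) * 2) else result
termination_by (n + 2 - i).toNat
decreasing_by omega

def while_loop_ii (n : Int) : Int := whileA n 0 1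

-- ===== PORT B =====
-- port of Python's int.bit_length (only reached with v ≥ 1 in B)
def pyBitLength (v : Int) : Int :=
  if v = 0 then 0 else ((Nat.log 2 v.natAbs : Nat) : Int) + 1

def while_loop_ii_alt (n : Int) : Int :=
  if n < 1 then 0
  else
    let m := pyBitLength (PySem.Int.floordiv (n + 2) 3)
    3 * (2 ^ m.toNat - 1) - 2 * m

-- ===== PRECONDITION & SPEC =====
def Spec_while_loop_ii (n : Int) (out : Int) : Prop := out = while_loop_ii_alt n
instance (n : Int) (out : Int) : Decidable (Spec_while_loop_ii n out) := by unfold Spec_while_loop_ii; infer_instance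

-- ===== CLAIM (what is proved, stated in full; the proofs are below) =====
def Claim_equal_while_loop_ii : Prop := ∀ (n : Int), Dom_while_loop_ii n → Spec_while_loop_ii n (while_loop_ii n)

-- ===== LEMMAS AND PROOFS =====

-- number of bits of v (= Python bit_length on naturals)
def blen (v : Nat) : Nat := if v = 0 then 0 else Nat.log 2 v + 1

-- iteration count of A's loop from loop variable i
def tc (n : Int) (i : Nat) : Nat :=
  if (i : Int) ≤ n then blen ((n + 2).toNat / (i + 2)) else 0

lemma blen_half (v : Nat) (hv : 1 ≤ v) : blen (v / 2) = blen v - 1 := by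
  rcases Nat.lt_or_ge v 2 with h | h
  · interval_cases v
    all_goals simp [blen]
  · have h2 : v / 2 ≠ 0 := by omega
    unfold blen
    rw [if_neg h2, if_neg (by omega)]
    rw [Nat.log_div_base]
    have : 1 ≤ Nat.log 2 v := Nat.log_pos (by norm_num) h
    omega

lemma blen_pos (v : Nat) (hv : 1 ≤ v) : 1 ≤ blen v := by
  unfold blen; rw [if_neg (by omega)]; omega

lemma tc_step (n : Int) (i : Nat) (h : (i : Int) ≤ n) :
    tc n ((i + 1) * 2) = tc n i - 1 := by
  unfold tc
  rw [if_pos h]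
  have hN : ((n + 2).toNat : Int) = n + 2 := by omega
  by_cases h2 : ((i + 1) * 2 : Nat) ≤ n
  · rw [if_pos (by exact_mod_cast h2)]
    have : (i + 1) * 2 + 2 = (i + 2) * 2 := by ring
    rw [this, ← Nat.div_div_eq_div_mul]
    exact blen_half _ (Nat.one_le_div_iff (by omega) |>.2 (by omega))
  · rw [if_neg (by exact_mod_cast h2)]
    -- here i ≤ n < 2*(i+1): the quotient is 1, so blen = 1
    have hub : n < ((i + 1) * 2 : Nat) := by
      push_cast; push_cast at h2; omega
    have hq : (n + 2).toNat / (i + 2) = 1 :=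
      Nat.div_eq_of_lt_le (by omega) (by omega)
    simp [hq, blen]

lemma tc_pos (n : Int) (i : Nat) (h : (i : Int) ≤ n) : 1 ≤ tc n i := by
  unfold tc
  rw [if_pos h]
  exact blen_pos _ (Nat.one_le_div_iff (by omega) |>.2 (by omega))

lemma whileA_closed (n result : Int) (i : Nat) :
    whileA n result i = result + ((i : Int) + 2) * (2 ^ tc n i - 1) - 2 * tc n i := by
  induction result, i using whileA.induct (n := n) with
  | case1 result i h ih =>
      rw [whileA, if_pos h, ih]
      have h1 : 1 ≤ tc n i := tc_pos n i h
      have hs : tc n ((i + 1) * 2) = tc n i - 1 := tc_step n i h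
      rw [hs]
      obtain ⟨t, ht⟩ : ∃ t, tc n i = t + 1 := ⟨tc n i - 1, by omega⟩
      rw [ht]
      have : t + 1 - 1 = t := rfl
      rw [this, pow_succ]
      push_cast
      ring
  | case2 result i h =>
      rw [whileA, if_neg h]
      simp [tc, if_neg h]

-- ===== VERDICT (by name: the statement is the Claim_ definition above) =====
theorem while_loop_ii_spec : Claim_equal_while_loop_ii := by
  intro n _
  unfold Spec_while_loop_ii while_loop_ii while_loop_ii_alt
  rw [whileA_closed]
  by_cases h1 : (1 : Int) ≤ n
  · rw [if_neg (by omega)]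
    have hfd : PySem.Int.floordiv (n + 2) 3 = (((n + 2).toNat / 3 : Nat) : Int) := by
      unfold PySem.Int.floordiv
      rw [Int.fdiv_eq_ediv]
      omega
    have hq : 1 ≤ (n + 2).toNat / 3 := Nat.one_le_div_iff (by omega) |>.2 (by omega)
    have hb : pyBitLength (PySem.Int.floordiv (n + 2) 3) = ((blen ((n + 2).toNat / 3) : Nat) : Int) := by
      rw [hfd]
      unfold pyBitLength blen
      rw [if_neg (by exact_mod_cast Nat.one_le_iff_ne_zero.mp hq),
          if_neg (Nat.one_le_iff_ne_zero.mp hq)]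
      congr 1
    have htc : tc n 1 = blen ((n + 2).toNat / 3) := by
      unfold tc; rw [if_pos (by exact_mod_cast h1)]
    simp only [hb, htc, Int.toNat_natCast]
    push_cast
    ring
  · rw [if_pos (by omega)]
    have htc : tc n 1 = 0 := by unfold tc; rw [if_neg (by exact_mod_cast h1)]
    rw [htc]
    norm_num
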